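-- pv_equiv track=rewrite | github.com/IgorGanapolsky/ai-kindlemint-engine | scripts/code_cleanup_orchestration/dead_code_detector.py | _find_reachable_files
-- ===== SOURCE A (Python) =====
-- from collections import defaultdict, deque
-- from typing import Any, Dict, List, Optional, Set
--
-- def _find_reachable_files(
--     entry_points: Set[str], edges: Dict[str, Set[str]]
-- ) -> Set[str]:
--     """Find all files reachable from entry points using BFS"""
--     reachable = set()
--     queue = deque(entry_points)
--
--     while queue:
--         current = queue.popleft()
--         if current in reachable:
--             continue
--
--         reachable.add(current)
--         for neighbor in edges.get(current, set()):
--             if neighbor not in reachable: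
--                 queue.append(neighbor)
--
--     return reachable
-- ===== SOURCE B (Python) =====
-- def _find_reachable_files(entry_points, edges):
--     """Find all files reachable from entry points by fixpoint saturation:
--     repeatedly fold every reachable node's neighbors into the set until it
--     stops growing (no queue, no frontier)."""
--     reachable = set(entry_points)
--     while True:
--         size = len(reachable)
--         for node in list(reachable):
--             reachable |= edges.get(node, set())
--         if len(reachable) == size:
--             return reachable
-- ===== Notes on version B (the rewrite author's own statement) =====
-- stated objective: alternative
-- what changed: Replaced the FIFO-queue BFS worklist by fixpoint saturation: no queue or frontier at all, each round rescans every reachable node and folds its neighbors into the set until a round adds nothing (naive-Datalog-style closure, O(V*(V+E)) instead of O(V+E)).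
import Mathlib
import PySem

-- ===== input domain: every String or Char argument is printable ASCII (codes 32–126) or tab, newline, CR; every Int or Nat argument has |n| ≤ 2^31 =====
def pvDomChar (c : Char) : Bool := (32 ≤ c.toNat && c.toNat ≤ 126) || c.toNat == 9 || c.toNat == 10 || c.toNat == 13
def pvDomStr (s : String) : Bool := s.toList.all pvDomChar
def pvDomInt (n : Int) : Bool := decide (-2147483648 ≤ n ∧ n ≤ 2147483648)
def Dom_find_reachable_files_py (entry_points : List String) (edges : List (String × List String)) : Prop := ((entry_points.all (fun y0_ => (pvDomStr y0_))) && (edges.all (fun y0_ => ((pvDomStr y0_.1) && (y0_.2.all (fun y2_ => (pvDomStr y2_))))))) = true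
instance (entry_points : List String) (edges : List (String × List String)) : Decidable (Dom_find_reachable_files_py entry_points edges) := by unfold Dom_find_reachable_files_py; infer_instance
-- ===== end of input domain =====

-- B replaces A's FIFO-queue BFS worklist by fixpoint saturation (each round rescans every
-- reachable node and folds in its neighbors until the set stops growing); same list.


-- termination measure for A's loop: number of edge keys not yet in `r`
def pvUnvisited (edges : List (String × List String)) (r : PySem.Set String) : Nat :=
  edges.countP (fun p => !(PySem.Set.contains r p.1))

lemma pvContains_eq (r : PySem.Set String) (x : String) :
    PySem.Set.contains r x = decide (x ∈ r) := by
  by_cases h : x ∈ r <;> simp [PySem.Set.contains, h]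

lemma pvContains_add (r : PySem.Set String) (c x : String) :
    PySem.Set.contains (PySem.Set.add r c) x = (decide (x ∈ r) || decide (x = c)) := by
  rw [pvContains_eq]
  by_cases h : x ∈ r ∨ x = c
  · have := (PySem.Set.mem_add r c x).2 h
    simp only [this, decide_true, Bool.true_eq]
    rcases h with h | h <;> simp [h]
  · have hm : ¬ x ∈ PySem.Set.add r c := fun hm => h ((PySem.Set.mem_add r c x).1 hm)
    have h1 : ¬ x ∈ r := fun h1 => h (Or.inl h1)
    have h2 : ¬ x = c := fun h2 => h (Or.inr h2)
    simp [hm, h1, h2]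

lemma pvCountP_lt {α : Type} (l : List α) (p q : α → Bool) (h : ∀ x ∈ l, p x → q x)
    (x : α) (hx : x ∈ l) (hq : q x = true) (hp : p x = false) :
    l.countP p < l.countP q := by
  induction l with
  | nil => simp at hx
  | cons a t ih =>
    have hmono : t.countP p ≤ t.countP q :=
      List.countP_mono_left (fun y hy => h y (List.mem_cons_of_mem a hy))
    simp only [List.countP_cons]
    rcases List.mem_cons.1 hx with rfl | hx
    · simp [hp, hq]; omega
    · have := ih (fun y hy => h y (List.mem_cons_of_mem a hy)) hx
      by_cases hpa : p a = true
      · have hqa := h a List.mem_cons_self hpa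
        simp [hpa, hqa]; omega
      · simp only [Bool.not_eq_true] at hpa
        simp only [hpa, Bool.false_eq_true, if_false, Nat.add_zero]
        split <;> omega

lemma pvUnvisited_add_lt (edges : List (String × List String)) (r : PySem.Set String) (c : String)
    (hc : c ∈ edges.map Prod.fst) (hr : PySem.Set.contains r c = false) :
    pvUnvisited edges (PySem.Set.add r c) < pvUnvisited edges r := by
  rcases List.mem_map.1 hc with ⟨p, hp, hpc⟩
  refine pvCountP_lt edges _ _ ?_ p hp ?_ ?_
  · intro y _ h
    rw [pvContains_add] at h
    simp only [Bool.not_or, Bool.and_eq_true, Bool.not_eq_true'] at h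
    rw [pvContains_eq]
    simpa using h.1
  · rw [hpc, hr]; rfl
  · rw [hpc, pvContains_add]; simp

-- if the popped node is no dict key, edges.get(c, set()) is the default
lemma pvGetD_not_key (edges : List (String × List String)) (c : String)
    (hc : ¬ c ∈ edges.map Prod.fst) : (PySem.Dict.mk edges).getD c [] = [] := by
  induction edges with
  | nil => rfl
  | cons p t ih =>
    simp only [List.map_cons, List.mem_cons, not_or] at hc
    simp only [PySem.Dict.getD, PySem.Dict.get?, List.find?] at *
    have : (p.1 == c) = false := beq_eq_false_iff_ne.2 (fun h => hc.1 h.symm)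
    simp only [this]
    exact ih hc.2

lemma pvUnvisited_add_eq_of_not_key (edges : List (String × List String)) (r : PySem.Set String)
    (c : String) (hc : ¬ c ∈ edges.map Prod.fst) :
    pvUnvisited edges (PySem.Set.add r c) = pvUnvisited edges r := by
  apply List.countP_congr
  intro p hp
  have hne : ¬ p.1 = c := fun h => hc (List.mem_map.2 ⟨p, hp, h⟩)
  rw [pvContains_add, pvContains_eq]
  simp [hne]

-- ===== PORT A =====
-- while queue: current = popleft(); skip if already reachable; add; append unvisited neighbors
def pvBfsA (edges : List (String × List String)) (r : PySem.Set String) (q : List String) :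
    PySem.Set String :=
  match q with
  | [] => r
  | c :: rest =>
    if PySem.Set.contains r c then pvBfsA edges r rest
    else
      let r1 := PySem.Set.add r c
      pvBfsA edges r1
        (rest ++ ((PySem.Dict.mk edges).getD c []).filter (fun n => !(PySem.Set.contains r1 n)))
termination_by (pvUnvisited edges r, q.length)
decreasing_by
  · exact Prod.Lex.right _ (by simp)
  · rename_i h
    by_cases hc : c ∈ edges.map Prod.fst
    · exact Prod.Lex.left _ _ (pvUnvisited_add_lt edges r c hc (by simpa using h))
    · rw [pvGetD_not_key edges c hc]
      simp only [List.filter_nil, List.append_nil]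
      rw [pvUnvisited_add_eq_of_not_key edges r c hc]
      exact Prod.Lex.right _ (by simp)

def find_reachable_files_py (entry_points : List String) (edges : List (String × List String)) : List String :=
  pvBfsA edges PySem.Set.empty entry_points

-- ===== PORT B =====
-- body of B's inner loop: reachable |= edges.get(node, set())
def pvF (edges : List (String × List String)) (acc : PySem.Set String) (node : String) :
    PySem.Set String :=
  PySem.Set.update acc ((PySem.Dict.mk edges).getD node [])

-- one round of B's while loop: for node in list(reachable): reachable |= edges.get(node, set())
def pvSatRound (edges : List (String × List String)) (S : PySem.Set String) : PySem.Set String :=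
  S.foldl (pvF edges) S

-- Set.update appends exactly its genuinely new elements
lemma pvUpdate_extend (l : List String) : ∀ (s : PySem.Set String),
    ∃ t, PySem.Set.update s l = s ++ t ∧ ∀ e ∈ t, e ∈ l ∧ e ∉ s := by
  induction l with
  | nil => intro s; exact ⟨[], by simp [PySem.Set.update_nil], by simp⟩
  | cons c cs ih =>
    intro s
    rw [PySem.Set.update_cons]
    by_cases hc : c ∈ s
    · rw [PySem.Set.add_of_mem hc]
      rcases ih s with ⟨t, h1, h2⟩
      exact ⟨t, h1, fun e he => ⟨List.mem_cons_of_mem c (h2 e he).1, (h2 e he).2⟩⟩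
    · rw [PySem.Set.add_of_not_mem hc]
      rcases ih (s ++ [c]) with ⟨t, h1, h2⟩
      refine ⟨c :: t, by simpa using h1, ?_⟩
      intro e he
      rcases List.mem_cons.1 he with rfl | he
      · exact ⟨List.mem_cons_self, hc⟩
      · exact ⟨List.mem_cons_of_mem c (h2 e he).1,
          fun hes => (h2 e he).2 (List.mem_append.2 (Or.inl hes))⟩

-- every dict value element occurs among the concatenated edge targets
lemma pvGetD_mem_flat (edges : List (String × List String)) (c e : String)
    (he : e ∈ (PySem.Dict.mk edges).getD c []) : e ∈ edges.flatMap Prod.snd := by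
  induction edges with
  | nil => simp [PySem.Dict.getD, PySem.Dict.get?] at he
  | cons p t ih =>
    simp only [PySem.Dict.getD, PySem.Dict.get?, List.find?] at he ih
    by_cases hp : (p.1 == c) = true
    · simp only [hp] at he
      exact List.mem_flatMap.2 ⟨p, List.mem_cons_self, he⟩
    · simp only [Bool.not_eq_true] at hp
      simp only [hp] at he
      rcases List.mem_flatMap.1 (ih he) with ⟨q, hq, hqe⟩
      exact List.mem_flatMap.2 ⟨q, List.mem_cons_of_mem p hq, hqe⟩

lemma pvSatFold_extend (edges : List (String × List String)) :
    ∀ (ns : List String) (acc : PySem.Set String),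
      ∃ t, ns.foldl (pvF edges) acc = acc ++ t ∧
        ∀ e ∈ t, e ∈ edges.flatMap Prod.snd ∧ e ∉ acc := by
  intro ns
  induction ns with
  | nil => intro acc; exact ⟨[], by simp, by simp⟩
  | cons c cs ih =>
    intro acc
    rw [List.foldl_cons]
    rcases pvUpdate_extend ((PySem.Dict.mk edges).getD c []) acc with ⟨t1, h1, h2⟩
    rcases ih (pvF edges acc c) with ⟨t2, h3, h4⟩
    refine ⟨t1 ++ t2, ?_, ?_⟩
    · rw [h3]
      show pvF edges acc c ++ t2 = acc ++ (t1 ++ t2)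
      rw [pvF, h1, List.append_assoc]
    · intro e he
      rcases List.mem_append.1 he with he | he
      · exact ⟨pvGetD_mem_flat edges c e (h2 e he).1, (h2 e he).2⟩
      · refine ⟨(h4 e he).1, fun hea => (h4 e he).2 ?_⟩
        show e ∈ pvF edges acc c
        rw [pvF, h1]
        exact List.mem_append.2 (Or.inl hea)

lemma pvSatRound_extend (edges : List (String × List String)) (S : PySem.Set String) :
    ∃ t, pvSatRound edges S = S ++ t ∧ ∀ e ∈ t, e ∈ edges.flatMap Prod.snd ∧ e ∉ S :=
  pvSatFold_extend edges S S

-- termination measure for B's outer loop: reachable targets not yet in S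
def pvTodo (edges : List (String × List String)) (S : PySem.Set String) : Nat :=
  (edges.flatMap Prod.snd).countP (fun x => !(PySem.Set.contains S x))

-- while True: size = len(reachable); one round; if len unchanged: return reachable
def pvSat (edges : List (String × List String)) (S : PySem.Set String) : PySem.Set String :=
  if PySem.Set.len (pvSatRound edges S) = PySem.Set.len S then pvSatRound edges S
  else pvSat edges (pvSatRound edges S)
termination_by pvTodo edges S
decreasing_by
  rename_i h
  rcases pvSatRound_extend edges S with ⟨t, hts, hprop⟩
  have ht : t ≠ [] := by
    intro h0
    rw [h0, List.append_nil] at hts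
    exact h (by rw [hts])
  rcases List.exists_cons_of_ne_nil ht with ⟨e, t', rfl⟩
  have he := hprop e List.mem_cons_self
  refine pvCountP_lt _ _ _ ?_ e he.1 ?_ ?_
  · intro x _ hx
    rw [pvContains_eq] at hx ⊢
    simp only [Bool.not_eq_eq_eq_not, Bool.not_true, decide_eq_false_iff_not] at hx ⊢
    intro hxS
    exact hx (by rw [hts]; exact List.mem_append.2 (Or.inl hxS))
  · rw [pvContains_eq]
    simp [he.2]
  · rw [pvContains_eq]
    have : e ∈ pvSatRound edges S := by
      rw [hts]; exact List.mem_append.2 (Or.inr List.mem_cons_self)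
    simp [this]

def find_reachable_files_py_alt (entry_points : List String) (edges : List (String × List String)) : List String :=
  pvSat edges (PySem.Set.ofList entry_points)

-- ===== PRECONDITION & SPEC =====
def Spec_find_reachable_files_py (entry_points : List String) (edges : List (String × List String)) (out : List String) : Prop := out = find_reachable_files_py_alt entry_points edges
instance (entry_points : List String) (edges : List (String × List String)) (out : List String) : Decidable (Spec_find_reachable_files_py entry_points edges out) := by unfold Spec_find_reachable_files_py; infer_instance

-- ===== CLAIM (what is proved, stated in full; the proofs are below) =====
def Claim_equal_find_reachable_files_py : Prop := ∀ (entry_points : List String) (edges : List (String × List String)), Dom_find_reachable_files_py entry_points edges → Spec_find_reachable_files_py entry_points edges (find_reachable_files_py entry_points edges)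

-- ===== LEMMAS AND PROOFS =====

lemma pvUnvisited_add_le (edges : List (String × List String)) (r : PySem.Set String) (c : String) :
    pvUnvisited edges (PySem.Set.add r c) ≤ pvUnvisited edges r := by
  apply List.countP_mono_left
  intro p _ h
  rw [pvContains_add] at h
  simp only [Bool.not_or, Bool.and_eq_true, Bool.not_eq_true'] at h
  rw [pvContains_eq]
  simpa using h.1

-- the body of a level-synchronous BFS round (proof device relating A to B)
def pvRound (edges : List (String × List String))
    (st : PySem.Set String × List String) (c : String) : PySem.Set String × List String :=
  if PySem.Set.contains st.1 c then st
  else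
    let r1 := PySem.Set.add st.1 c
    (r1, st.2 ++ ((PySem.Dict.mk edges).getD c []).filter (fun n => !(PySem.Set.contains r1 n)))

lemma pvRound_skip (edges : List (String × List String)) (r : PySem.Set String)
    (acc : List String) (c : String) (h : PySem.Set.contains r c = true) :
    pvRound edges (r, acc) c = (r, acc) := by
  unfold pvRound; exact if_pos h

lemma pvRound_new (edges : List (String × List String)) (r : PySem.Set String)
    (acc : List String) (c : String) (h : PySem.Set.contains r c = false) :
    pvRound edges (r, acc) c =
      (PySem.Set.add r c,
        acc ++ ((PySem.Dict.mk edges).getD c []).filter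
          (fun n => !(PySem.Set.contains (PySem.Set.add r c) n))) := by
  unfold pvRound; rw [if_neg (by rw [h]; simp)]

-- one whole round leaves nxt empty or visits strictly more keys (termination of pvLevels)
lemma pvRound_progress (edges : List (String × List String)) :
    ∀ (front : List String) (r : PySem.Set String) (acc : List String),
      pvUnvisited edges (front.foldl (pvRound edges) (r, acc)).1 < pvUnvisited edges r ∨
      ((front.foldl (pvRound edges) (r, acc)).2 = acc ∧
        pvUnvisited edges (front.foldl (pvRound edges) (r, acc)).1 = pvUnvisited edges r) := by
  intro front
  induction front with
  | nil => intro r acc; right; exact ⟨rfl, rfl⟩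
  | cons c fs ih =>
    intro r acc
    rw [List.foldl_cons]
    by_cases h : PySem.Set.contains r c = true
    · rw [pvRound_skip edges r acc c h]
      exact ih r acc
    · rw [Bool.not_eq_true] at h
      rw [pvRound_new edges r acc c h]
      by_cases hc : c ∈ edges.map Prod.fst
      · rcases ih (PySem.Set.add r c) _ with h1 | h1
        · left; exact lt_of_lt_of_le h1 (pvUnvisited_add_le edges r c)
        · left; rw [h1.2]; exact pvUnvisited_add_lt edges r c hc h
      · rw [pvGetD_not_key edges c hc]
        simp only [List.filter_nil, List.append_nil]
        rcases ih (PySem.Set.add r c) acc with h1 | h1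
        · left; exact lt_of_lt_of_le h1 (pvUnvisited_add_le edges r c)
        · right
          exact ⟨h1.1, by rw [h1.2, pvUnvisited_add_eq_of_not_key edges r c hc]⟩

-- level-synchronous BFS (proof device: equals A's BFS, and equals B's saturation)
def pvLevels (edges : List (String × List String)) (r : PySem.Set String)
    (frontier : List String) : PySem.Set String :=
  match frontier with
  | [] => r
  | _ :: _ =>
    let st := frontier.foldl (pvRound edges) (r, [])
    pvLevels edges st.1 st.2
termination_by (pvUnvisited edges r, frontier.length)
decreasing_by
  simp only [List.foldl_subtype, List.unattach_attach]
  rcases pvRound_progress edges frontier r [] with h | h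
  · exact Prod.Lex.left _ _ h
  · rw [h.1, h.2]
    exact Prod.Lex.right _ (by simp)

-- recursive (non-accumulating) form of one round
def pvStepRec (edges : List (String × List String)) (r : PySem.Set String) :
    List String → PySem.Set String × List String
  | [] => (r, [])
  | c :: fs =>
    if PySem.Set.contains r c then pvStepRec edges r fs
    else
      let r1 := PySem.Set.add r c
      let ns := ((PySem.Dict.mk edges).getD c []).filter (fun n => !(PySem.Set.contains r1 n))
      let p := pvStepRec edges r1 fs
      (p.1, ns ++ p.2)

lemma pvStepRec_skip (edges : List (String × List String)) (r : PySem.Set String)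
    (c : String) (fs : List String) (h : PySem.Set.contains r c = true) :
    pvStepRec edges r (c :: fs) = pvStepRec edges r fs := by
  simp only [pvStepRec]; rw [if_pos h]

lemma pvStepRec_new (edges : List (String × List String)) (r : PySem.Set String)
    (c : String) (fs : List String) (h : PySem.Set.contains r c = false) :
    pvStepRec edges r (c :: fs) =
      ((pvStepRec edges (PySem.Set.add r c) fs).1,
        ((PySem.Dict.mk edges).getD c []).filter
            (fun n => !(PySem.Set.contains (PySem.Set.add r c) n))
          ++ (pvStepRec edges (PySem.Set.add r c) fs).2) := by
  simp only [pvStepRec]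
  rw [if_neg (by rw [h]; simp)]

lemma pvFoldl_eq_stepRec (edges : List (String × List String)) :
    ∀ (front : List String) (r : PySem.Set String) (acc : List String),
      front.foldl (pvRound edges) (r, acc)
        = ((pvStepRec edges r front).1, acc ++ (pvStepRec edges r front).2) := by
  intro front
  induction front with
  | nil => intro r acc; simp [pvStepRec]
  | cons c fs ih =>
    intro r acc
    rw [List.foldl_cons]
    by_cases h : PySem.Set.contains r c = true
    · rw [pvRound_skip edges r acc c h, pvStepRec_skip edges r c fs h]
      exact ih r acc
    · rw [Bool.not_eq_true] at h
      rw [pvRound_new edges r acc c h, pvStepRec_new edges r c fs h]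
      rw [ih (PySem.Set.add r c) _]
      simp [List.append_assoc]

lemma pvBfsA_nil (edges : List (String × List String)) (r : PySem.Set String) :
    pvBfsA edges r [] = r := by
  unfold pvBfsA; rfl

lemma pvBfsA_skip (edges : List (String × List String)) (r : PySem.Set String)
    (c : String) (rest : List String) (h : PySem.Set.contains r c = true) :
    pvBfsA edges r (c :: rest) = pvBfsA edges r rest := by
  rw [pvBfsA]
  rw [if_pos h]

lemma pvBfsA_new (edges : List (String × List String)) (r : PySem.Set String)
    (c : String) (rest : List String) (h : PySem.Set.contains r c = false) :
    pvBfsA edges r (c :: rest) =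
      pvBfsA edges (PySem.Set.add r c)
        (rest ++ ((PySem.Dict.mk edges).getD c []).filter
          (fun n => !(PySem.Set.contains (PySem.Set.add r c) n))) := by
  rw [pvBfsA]
  rw [if_neg (by rw [h]; simp)]

lemma pvBfsA_split (edges : List (String × List String)) :
    ∀ (front : List String) (r : PySem.Set String) (rest : List String),
      pvBfsA edges r (front ++ rest)
        = pvBfsA edges (pvStepRec edges r front).1 (rest ++ (pvStepRec edges r front).2) := by
  intro front
  induction front with
  | nil => intro r rest; simp [pvStepRec]
  | cons c fs ih =>
    intro r rest
    rw [List.cons_append]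
    by_cases h : PySem.Set.contains r c = true
    · rw [pvBfsA_skip edges r c _ h, pvStepRec_skip edges r c fs h]
      exact ih r rest
    · rw [Bool.not_eq_true] at h
      rw [pvBfsA_new edges r c _ h, pvStepRec_new edges r c fs h]
      rw [List.append_assoc]
      rw [ih (PySem.Set.add r c) _]
      simp [List.append_assoc]

lemma pvLevels_eq_bfsA (edges : List (String × List String)) (r : PySem.Set String)
    (frontier : List String) : pvLevels edges r frontier = pvBfsA edges r frontier := by
  induction r, frontier using pvLevels.induct edges with
  | case1 r => rw [pvBfsA_nil]; unfold pvLevels; rfl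
  | case2 r c fs st ih =>
    have hst : st = (c :: fs).foldl (pvRound edges) (r, []) := by
      simp only [st, List.foldl_subtype, List.unattach_attach]
    rw [hst, pvFoldl_eq_stepRec] at ih
    conv_lhs => unfold pvLevels
    show pvLevels edges ((c :: fs).foldl (pvRound edges) (r, [])).1
        ((c :: fs).foldl (pvRound edges) (r, [])).2 = _
    rw [pvFoldl_eq_stepRec]
    have hsplit := pvBfsA_split edges (c :: fs) r []
    rw [List.append_nil] at hsplit
    rw [hsplit]
    simpa using ih

-- ===== relating level-synchronous BFS to B's saturation =====

-- the genuinely new elements of f relative to r, in first-occurrence order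
def pvNew (r : PySem.Set String) : List String → List String
  | [] => []
  | c :: fs =>
    if PySem.Set.contains r c then pvNew r fs else c :: pvNew (PySem.Set.add r c) fs

lemma pvUpdate_eq_append_new : ∀ (f : List String) (r : PySem.Set String),
    PySem.Set.update r f = r ++ pvNew r f := by
  intro f
  induction f with
  | nil => intro r; simp [PySem.Set.update_nil, pvNew]
  | cons c fs ih =>
    intro r
    rw [PySem.Set.update_cons]
    by_cases hc : c ∈ r
    · rw [PySem.Set.add_of_mem hc, ih r, pvNew]
      rw [pvContains_eq]; simp [hc]
    · rw [ih (PySem.Set.add r c), pvNew]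
      rw [pvContains_eq]
      simp only [hc, decide_false, Bool.false_eq_true, if_false]
      rw [PySem.Set.add_of_not_mem hc]
      simp

lemma pvUpdate_subset_id (l : List String) : ∀ (s : PySem.Set String),
    (∀ e ∈ l, e ∈ s) → PySem.Set.update s l = s := by
  induction l with
  | nil => intro s _; simp [PySem.Set.update_nil]
  | cons c cs ih =>
    intro s h
    rw [PySem.Set.update_cons, PySem.Set.add_of_mem (h c List.mem_cons_self)]
    exact ih s (fun e he => h e (List.mem_cons_of_mem c he))

lemma pvMem_update_left (s : PySem.Set String) (l : List String) (e : String) (h : e ∈ s) :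
    e ∈ PySem.Set.update s l := (PySem.Set.mem_update s l e).2 (Or.inl h)

lemma pvMem_update_right (s : PySem.Set String) (l : List String) (e : String) (h : e ∈ l) :
    e ∈ PySem.Set.update s l := (PySem.Set.mem_update s l e).2 (Or.inr h)

lemma pvUpdate_filter (l : List String) : ∀ (a : PySem.Set String) (p : String → Bool),
    (∀ e ∈ l, p e = false → e ∈ a) →
    PySem.Set.update a (l.filter p) = PySem.Set.update a l := by
  induction l with
  | nil => intro a p _; simp
  | cons c cs ih =>
    intro a p h
    by_cases hp : p c = true
    · rw [List.filter_cons_of_pos hp, PySem.Set.update_cons, PySem.Set.update_cons]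
      exact ih (PySem.Set.add a c) p
        (fun e he hpe => (PySem.Set.mem_add a c e).2 (Or.inl (h e (List.mem_cons_of_mem c he) hpe)))
    · rw [Bool.not_eq_true] at hp
      rw [List.filter_cons_of_neg (by simp [hp]), PySem.Set.update_cons,
        PySem.Set.add_of_mem (h c List.mem_cons_self hp)]
      exact ih a p (fun e he hpe => h e (List.mem_cons_of_mem c he) hpe)

-- scanning already-closed nodes changes nothing
lemma pvFold_id (edges : List (String × List String)) (ns : List String) :
    ∀ (S : PySem.Set String),
      (∀ x ∈ ns, ∀ n ∈ (PySem.Dict.mk edges).getD x [], n ∈ S) →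
      ns.foldl (pvF edges) S = S := by
  induction ns with
  | nil => intro S _; rfl
  | cons c cs ih =>
    intro S h
    rw [List.foldl_cons]
    have : pvF edges S c = S := by
      rw [pvF]
      exact pvUpdate_subset_id _ S (h c List.mem_cons_self)
    rw [this]
    exact ih S (fun x hx => h x (List.mem_cons_of_mem c hx))

-- scanning the new nodes = folding in the next frontier
lemma pvNewFold_eq (edges : List (String × List String)) :
    ∀ (f : List String) (r acc : PySem.Set String),
      (∀ e, e ∈ PySem.Set.update r f → e ∈ acc) →
      (pvNew r f).foldl (pvF edges) acc
        = PySem.Set.update acc (pvStepRec edges r f).2 := by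
  intro f
  induction f with
  | nil => intro r acc _; simp [pvNew, pvStepRec, PySem.Set.update_nil]
  | cons c fs ih =>
    intro r acc h
    by_cases hc : PySem.Set.contains r c = true
    · rw [pvNew, if_pos hc, pvStepRec_skip edges r c fs hc]
      refine ih r acc (fun e he => h e ?_)
      rw [PySem.Set.update_cons, PySem.Set.add_of_mem (by rw [pvContains_eq] at hc; simpa using hc)]
      exact he
    · rw [Bool.not_eq_true] at hc
      rw [pvNew, hc, if_neg (by simp), pvStepRec_new edges r c fs hc, List.foldl_cons]
      rw [PySem.Set.update_append]
      have hfil : PySem.Set.update acc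
          (((PySem.Dict.mk edges).getD c []).filter
            (fun n => !(PySem.Set.contains (PySem.Set.add r c) n)))
          = pvF edges acc c := by
        rw [pvF]
        refine pvUpdate_filter _ acc _ ?_
        intro e he hpe
        simp only [Bool.not_eq_false'] at hpe
        rw [pvContains_eq] at hpe
        have : e ∈ PySem.Set.add r c := by simpa using hpe
        refine h e ?_
        rw [PySem.Set.update_cons]
        exact pvMem_update_left _ _ _ this
      rw [hfil]
      refine ih (PySem.Set.add r c) (pvF edges acc c) ?_
      intro e he
      have : e ∈ PySem.Set.update r (c :: fs) := by rw [PySem.Set.update_cons]; exact he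
      have := h e this
      rw [pvF]
      exact pvMem_update_left _ _ _ this

-- one saturation round from (r ⊕ f) equals (r ⊕ f) ⊕ next-frontier
lemma pvSatRound_eq (edges : List (String × List String)) (r : PySem.Set String)
    (f : List String)
    (hcl : ∀ x ∈ r, ∀ n ∈ (PySem.Dict.mk edges).getD x [], n ∈ PySem.Set.update r f) :
    pvSatRound edges (PySem.Set.update r f)
      = PySem.Set.update (PySem.Set.update r f) (pvStepRec edges r f).2 := by
  rw [pvSatRound]
  conv_lhs => rw [pvUpdate_eq_append_new f r]
  rw [List.foldl_append]
  rw [pvFold_id edges r _ (by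
    intro x hx n hn
    rw [← pvUpdate_eq_append_new f r]
    exact hcl x hx n hn)]
  rw [← pvUpdate_eq_append_new f r]
  exact pvNewFold_eq edges f r _ (fun e he => he)

-- neighbors of the newly reached nodes lie in (r ⊕ f) or in the next frontier
lemma pvNew_neighbors (edges : List (String × List String)) :
    ∀ (f : List String) (r : PySem.Set String) (x : String), x ∈ pvNew r f →
      ∀ n ∈ (PySem.Dict.mk edges).getD x [],
        n ∈ PySem.Set.update r f ∨ n ∈ (pvStepRec edges r f).2 := by
  intro f
  induction f with
  | nil => intro r x hx; simp [pvNew] at hx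
  | cons c fs ih =>
    intro r x hx n hn
    by_cases hc : PySem.Set.contains r c = true
    · rw [pvNew, if_pos hc] at hx
      rw [PySem.Set.update_cons, PySem.Set.add_of_mem (by rw [pvContains_eq] at hc; simpa using hc)]
      rw [pvStepRec_skip edges r c fs hc]
      exact ih r x hx n hn
    · rw [Bool.not_eq_true] at hc
      rw [pvNew, hc, if_neg (by simp)] at hx
      rw [PySem.Set.update_cons, pvStepRec_new edges r c fs hc]
      rcases List.mem_cons.1 hx with rfl | hx
      · by_cases hm : PySem.Set.contains (PySem.Set.add r x) n = true
        · left
          have : n ∈ PySem.Set.add r x := by rw [pvContains_eq] at hm; simpa using hm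
          exact pvMem_update_left _ _ _ this
        · right
          rw [Bool.not_eq_true] at hm
          exact List.mem_append.2 (Or.inl (List.mem_filter.2 ⟨hn, by
            show (!PySem.Set.contains (PySem.Set.add r x) n) = true
            rw [hm]; rfl⟩))
      · rcases ih (PySem.Set.add r c) x hx n hn with h | h
        · exact Or.inl h
        · exact Or.inr (List.mem_append.2 (Or.inr h))

-- rounds on an already-reached frontier do nothing
lemma pvRoundFold_id (edges : List (String × List String)) :
    ∀ (f : List String) (S : PySem.Set String) (acc : List String),
      (∀ e ∈ f, e ∈ S) → f.foldl (pvRound edges) (S, acc) = (S, acc) := by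
  intro f
  induction f with
  | nil => intro S acc _; rfl
  | cons c cs ih =>
    intro S acc h
    rw [List.foldl_cons, pvRound_skip edges S acc c
      (by rw [pvContains_eq]; simp [h c List.mem_cons_self])]
    exact ih S acc (fun e he => h e (List.mem_cons_of_mem c he))

lemma pvLevels_const (edges : List (String × List String)) (S : PySem.Set String)
    (f : List String) (h : ∀ e ∈ f, e ∈ S) : pvLevels edges S f = S := by
  cases f with
  | nil => unfold pvLevels; rfl
  | cons c cs =>
    conv_lhs => unfold pvLevels
    show pvLevels edges ((c :: cs).foldl (pvRound edges) (S, [])).1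
        ((c :: cs).foldl (pvRound edges) (S, [])).2 = _
    rw [pvRoundFold_id edges (c :: cs) S [] h]
    unfold pvLevels; rfl

lemma pvLen_inj (s t : PySem.Set String) (u : List String) (hst : t = s ++ u)
    (h : PySem.Set.len t = PySem.Set.len s) : t = s := by
  have : t.length = s.length := by
    have := h
    simp only [PySem.Set.len] at this
    exact_mod_cast this
  rw [hst] at this ⊢
  have : u = [] := by
    rw [List.length_append] at this
    exact List.eq_nil_of_length_eq_zero (by omega)
  simp [this]

-- MAIN: level-synchronous BFS from (r, f) = saturation from (r ⊕ f), given r's closure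
lemma pvLevels_eq_sat (edges : List (String × List String)) :
    ∀ (r : PySem.Set String) (f : List String),
      (∀ x ∈ r, ∀ n ∈ (PySem.Dict.mk edges).getD x [], n ∈ PySem.Set.update r f) →
      pvLevels edges r f = pvSat edges (PySem.Set.update r f) := by
  intro r0 f0
  induction r0, f0 using pvLevels.induct edges with
  | case1 r =>
    intro hcl
    rw [PySem.Set.update_nil] at hcl ⊢
    have hround : pvSatRound edges r = r := by
      rw [pvSatRound]
      exact pvFold_id edges r r hcl
    rw [pvSat, hround, if_pos rfl]
    unfold pvLevels; rfl
  | case2 r c fs st ih =>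
    intro hcl
    have hst : st = (c :: fs).foldl (pvRound edges) (r, []) := by
      simp only [st, List.foldl_subtype, List.unattach_attach]
    have hst1 : st.1 = PySem.Set.update r (c :: fs) := by
      rw [hst, pvFoldl_eq_stepRec]
      -- (pvStepRec r f).1 = update r f
      clear hst ih hcl st
      induction (c :: fs) generalizing r with
      | nil => simp [pvStepRec, PySem.Set.update_nil]
      | cons d ds ih2 =>
        by_cases hd : PySem.Set.contains r d = true
        · rw [pvStepRec_skip edges r d ds hd, PySem.Set.update_cons,
            PySem.Set.add_of_mem (by rw [pvContains_eq] at hd; simpa using hd)]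
          exact ih2 r
        · rw [Bool.not_eq_true] at hd
          rw [pvStepRec_new edges r d ds hd, PySem.Set.update_cons]
          exact ih2 (PySem.Set.add r d)
    have hst2 : st.2 = (pvStepRec edges r (c :: fs)).2 := by
      rw [hst, pvFoldl_eq_stepRec]; simp
    -- abbreviations
    have hLHS : pvLevels edges r (c :: fs) = pvLevels edges st.1 st.2 := by
      conv_lhs => unfold pvLevels
      rw [← hst]
    have hround : pvSatRound edges (PySem.Set.update r (c :: fs))
        = PySem.Set.update (PySem.Set.update r (c :: fs)) (pvStepRec edges r (c :: fs)).2 :=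
      pvSatRound_eq edges r (c :: fs) hcl
    have hcl' : ∀ x ∈ st.1, ∀ n ∈ (PySem.Dict.mk edges).getD x [],
        n ∈ PySem.Set.update st.1 st.2 := by
      intro x hx n hn
      rw [hst1] at hx
      rw [hst1, hst2]
      rw [pvUpdate_eq_append_new (c :: fs) r] at hx
      rcases List.mem_append.1 hx with hx | hx
      · exact pvMem_update_left _ _ _ (hcl x hx n hn)
      · rcases pvNew_neighbors edges (c :: fs) r x hx n hn with h | h
        · exact pvMem_update_left _ _ _ h
        · exact pvMem_update_right _ _ _ h
    rw [hLHS]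
    by_cases hlen : PySem.Set.len (pvSatRound edges (PySem.Set.update r (c :: fs)))
        = PySem.Set.len (PySem.Set.update r (c :: fs))
    · -- fixpoint: the round added nothing
      have hfix : pvSatRound edges (PySem.Set.update r (c :: fs))
          = PySem.Set.update r (c :: fs) := by
        rcases pvSatRound_extend edges (PySem.Set.update r (c :: fs)) with ⟨t, hts, _⟩
        exact pvLen_inj _ _ t hts hlen
      rw [pvSat, if_pos hlen, hfix]
      have hmem : ∀ e ∈ st.2, e ∈ st.1 := by
        intro e he
        rw [hst1]
        have : e ∈ PySem.Set.update (PySem.Set.update r (c :: fs))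
            (pvStepRec edges r (c :: fs)).2 := pvMem_update_right _ _ _ (by rw [← hst2]; exact he)
        rw [← hround, hfix] at this
        exact this
      rw [pvLevels_const edges st.1 st.2 hmem, hst1]
    · rw [pvSat, if_neg hlen]
      rw [hround, ← hst1, ← hst2]
      exact ih hcl'

-- ===== VERDICT (by name: the statement is the Claim_ definition above) =====
theorem find_reachable_files_py_spec : Claim_equal_find_reachable_files_py := by
  intro entry_points edges _
  unfold Spec_find_reachable_files_py find_reachable_files_py find_reachable_files_py_alt
  rw [← pvLevels_eq_bfsA]
  have h := pvLevels_eq_sat edges PySem.Set.empty entry_points (by intro x hx; simp [PySem.Set.empty] at hx)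
  rw [h]
  have he : PySem.Set.update PySem.Set.empty entry_points = PySem.Set.ofList entry_points := by
    rw [PySem.Set.ofList_eq_foldl]
    rfl
  rw [he]
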